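-- pv_equiv track=rewrite | github.com/Arban19/rendezvousWithCassidoo | max_pairs.py | max_pairs
-- ===== SOURCE A (Python) =====
-- def max_pairs(pairs):
--     left_collection = {}
--     right_collection = {}
--
--     for pair in pairs:
--         direction, size = pair.split("-")
--
--         if direction == "L":
--             if size in left_collection:
--                 left_collection[size] += 1
--             else:
--                 left_collection[size] = 1
--
--         elif direction == "R":
--             if size in right_collection:
--                 right_collection[size] += 1
--             else:
--                 right_collection[size] = 1
--
--     return calculate_overlap(left_collection, right_collection)
--
-- def calculate_overlap(left_collection, right_collection):
--     return sum(min(left_collection.get(size, 0), right_collection.get(size, 0)) for size in left_collection)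
-- ===== SOURCE B (Python) =====
-- def max_pairs(pairs):
--     # Online matching: match each item against the opposite side's still-unmatched
--     # stock as it arrives; no final reduction over the dicts is needed.
--     matched = 0
--     left_unmatched = {}
--     right_unmatched = {}
--     for pair in pairs:
--         direction, size = pair.split("-")
--         if direction == "L":
--             if right_unmatched.get(size, 0) > 0:
--                 matched += 1
--                 right_unmatched[size] -= 1
--             else:
--                 left_unmatched[size] = left_unmatched.get(size, 0) + 1
--         elif direction == "R":
--             if left_unmatched.get(size, 0) > 0:
--                 matched += 1
--                 left_unmatched[size] -= 1
--             else:
--                 right_unmatched[size] = right_unmatched.get(size, 0) + 1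
--     return matched
-- ===== Notes on version B (the rewrite author's own statement) =====
-- stated objective: alternative
-- what changed: B matches items online against the opposite side's still-unmatched stock and returns a running counter, instead of building two full histograms and reducing them with a final sum-of-mins pass.
import Mathlib
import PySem

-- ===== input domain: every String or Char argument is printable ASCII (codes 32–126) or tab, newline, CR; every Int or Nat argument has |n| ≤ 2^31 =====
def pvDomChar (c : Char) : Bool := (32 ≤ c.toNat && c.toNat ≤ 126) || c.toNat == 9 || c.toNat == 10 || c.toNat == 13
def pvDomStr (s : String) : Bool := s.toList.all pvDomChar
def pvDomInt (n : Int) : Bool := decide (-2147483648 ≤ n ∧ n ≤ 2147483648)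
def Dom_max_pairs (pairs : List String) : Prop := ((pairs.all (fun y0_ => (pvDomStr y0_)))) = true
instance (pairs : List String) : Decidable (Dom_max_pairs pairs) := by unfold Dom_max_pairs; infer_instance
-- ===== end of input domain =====

-- B matches items online against the opposite side's still-unmatched stock (running counter)
-- instead of building two full histograms and reducing them with a final sum-of-mins pass.


-- ===== PORT A =====
-- one loop iteration of A: `direction, size = pair.split("-")`, then grow the matching histogram
def stepA (st : PySem.Dict String Int × PySem.Dict String Int) (pair : String) :
    PySem.Dict String Int × PySem.Dict String Int :=
  match PySem.Str.split? pair "-" with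
  | some [direction, size] =>
    if direction = "L" then
      if st.1.contains size then (st.1.insert size (st.1.getD size 0 + 1), st.2)
      else (st.1.insert size 1, st.2)
    else if direction = "R" then
      if st.2.contains size then (st.1, st.2.insert size (st.2.getD size 0 + 1))
      else (st.1, st.2.insert size 1)
    else st
  | _ => st  -- Python raises ValueError here (unpacking); excluded by Pre_

def calculate_overlap (left_collection right_collection : PySem.Dict String Int) : Int :=
  (left_collection.keys.map
    (fun size => min (left_collection.getD size 0) (right_collection.getD size 0))).sum

def max_pairs (pairs : List String) : Int :=
  let st := pairs.foldl stepA (PySem.Dict.empty, PySem.Dict.empty)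
  calculate_overlap st.1 st.2

-- ===== PORT B =====
-- one loop iteration of B: match against the opposite unmatched stock or stash as unmatched
def stepB (st : Int × PySem.Dict String Int × PySem.Dict String Int) (pair : String) :
    Int × PySem.Dict String Int × PySem.Dict String Int :=
  match PySem.Str.split? pair "-" with
  | some [direction, size] =>
    if direction = "L" then
      if st.2.2.getD size 0 > 0 then (st.1 + 1, st.2.1, st.2.2.insert size (st.2.2.getD size 0 - 1))
      else (st.1, st.2.1.insert size (st.2.1.getD size 0 + 1), st.2.2)
    else if direction = "R" then
      if st.2.1.getD size 0 > 0 then (st.1 + 1, st.2.1.insert size (st.2.1.getD size 0 - 1), st.2.2)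
      else (st.1, st.2.1, st.2.2.insert size (st.2.2.getD size 0 + 1))
    else st
  | _ => st  -- Python raises ValueError here (unpacking); excluded by Pre_

def max_pairs_alt (pairs : List String) : Int :=
  (pairs.foldl stepB (0, PySem.Dict.empty, PySem.Dict.empty)).1

-- ===== PRECONDITION & SPEC =====
-- Pre_ excludes exactly the inputs where `direction, size = pair.split("-")` raises ValueError
-- (a token with no '-' or more than one '-'); both A and B raise there.
def Pre_max_pairs (pairs : List String) : Prop :=
  ∀ p ∈ pairs, ((PySem.Str.split? p "-").getD []).length = 2

instance (pairs : List String) : Decidable (Pre_max_pairs pairs) := by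
  unfold Pre_max_pairs; infer_instance

def pvWitness_max_pairs : List String := ["L-10", "R-10", "R-7", "L-7", "L-7"]

def Spec_max_pairs (pairs : List String) (out : Int) : Prop := out = max_pairs_alt pairs
instance (pairs : List String) (out : Int) : Decidable (Spec_max_pairs pairs out) := by
  unfold Spec_max_pairs; infer_instance

-- ===== CLAIM (what is proved, stated in full; the proofs are below) =====
def Claim_equal_max_pairs : Prop :=
  ∀ (pairs : List String), Dom_max_pairs pairs → Pre_max_pairs pairs →
    Spec_max_pairs pairs (max_pairs pairs)

-- ===== LEMMAS AND PROOFS =====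

-- replacing the value of f at one member of a Nodup list changes the sum by the difference
lemma sum_map_update {α : Type} [DecidableEq α] (ks : List α) (f g : α → Int) (s : α)
    (hnd : ks.Nodup) (hs : s ∈ ks) (hoff : ∀ t, t ≠ s → f t = g t) :
    (ks.map f).sum = (ks.map g).sum + (f s - g s) := by
  induction ks with
  | nil => cases hs
  | cons a ks ih =>
    rcases List.nodup_cons.mp hnd with ⟨ha, hnd'⟩
    rcases List.mem_cons.mp hs with h | h
    · subst h
      have : ks.map f = ks.map g :=
        List.map_congr_left (fun t ht => hoff t (fun e => ha (e ▸ ht)))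
      simp [this]; ring
    · have hne : a ≠ s := fun e => ha (e ▸ h)
      simp [hoff a hne, ih hnd' h]; ring

-- overlap after bumping a key on the LEFT histogram
lemma overlap_insert_left (L R : PySem.Dict String Int) (s : String) (v : Int)
    (hnd : L.keys.Nodup) :
    calculate_overlap (L.insert s v) R =
      if L.contains s then
        calculate_overlap L R + (min v (R.getD s 0) - min (L.getD s 0) (R.getD s 0))
      else calculate_overlap L R + min v (R.getD s 0) := by
  by_cases hc : L.contains s = true
  · have hmem : s ∈ L.keys := (PySem.Dict.contains_iff_mem_keys L s).mp hc
    simp only [calculate_overlap, PySem.Dict.keys_insert_of_contains L v hc, hc, if_true]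
    rw [sum_map_update L.keys _ (fun t => min (L.getD t 0) (R.getD t 0)) s hnd hmem
      (fun t ht => by rw [PySem.Dict.getD_insert]; simp [ht])]
    rw [PySem.Dict.getD_insert]; simp
  · have hmem : s ∉ L.keys := fun h => hc ((PySem.Dict.contains_iff_mem_keys L s).mpr h)
    simp only [calculate_overlap,
      PySem.Dict.keys_insert_of_not_contains L v (by simpa using hc), hc,
      List.map_append, List.sum_append, List.map_cons, List.map_nil, List.sum_cons,
      List.sum_nil, Bool.false_eq_true, if_false]
    have he : L.keys.map (fun t => min ((L.insert s v).getD t 0) (R.getD t 0)) =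
        L.keys.map (fun t => min (L.getD t 0) (R.getD t 0)) :=
      List.map_congr_left (fun t ht => by
        have hts : t ≠ s := fun e => hmem (e ▸ ht)
        rw [PySem.Dict.getD_insert]; simp [hts])
    rw [he, PySem.Dict.getD_insert]; simp

-- overlap after bumping a key on the RIGHT histogram (keys of the sum don't move)
lemma overlap_insert_right (L R : PySem.Dict String Int) (s : String) (v : Int)
    (hnd : L.keys.Nodup) :
    calculate_overlap L (R.insert s v) =
      if L.contains s then
        calculate_overlap L R + (min (L.getD s 0) v - min (L.getD s 0) (R.getD s 0))
      else calculate_overlap L R := by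
  by_cases hc : L.contains s = true
  · have hmem : s ∈ L.keys := (PySem.Dict.contains_iff_mem_keys L s).mp hc
    simp only [calculate_overlap, hc, if_true]
    rw [sum_map_update L.keys _ (fun t => min (L.getD t 0) (R.getD t 0)) s hnd hmem
      (fun t ht => by rw [PySem.Dict.getD_insert]; simp [ht])]
    rw [PySem.Dict.getD_insert]; simp
  · have hmem : s ∉ L.keys := fun h => hc ((PySem.Dict.contains_iff_mem_keys L s).mpr h)
    simp only [calculate_overlap, hc, Bool.false_eq_true, if_false]
    congr 1
    exact List.map_congr_left (fun t ht => by
      have hts : t ≠ s := fun e => hmem (e ▸ ht)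
      rw [PySem.Dict.getD_insert]; simp [hts])

-- the loop invariant: B's counter equals the overlap of A's histograms, and B's dicts hold
-- exactly the unmatched surplus of each side
lemma main_invariant (pairs : List String)
    (L R : PySem.Dict String Int) (res : Int) (l r : PySem.Dict String Int)
    (hnd : L.keys.Nodup)
    (hL : ∀ s, 0 ≤ L.getD s 0 ∧ (0 < L.getD s 0 → L.contains s = true))
    (hR : ∀ s, 0 ≤ R.getD s 0)
    (hl : ∀ s, l.getD s 0 = L.getD s 0 - min (L.getD s 0) (R.getD s 0))
    (hr : ∀ s, r.getD s 0 = R.getD s 0 - min (L.getD s 0) (R.getD s 0))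
    (hres : res = calculate_overlap L R) :
    (pairs.foldl stepB (res, l, r)).1 =
      calculate_overlap (pairs.foldl stepA (L, R)).1 (pairs.foldl stepA (L, R)).2 := by
  induction pairs generalizing L R res l r with
  | nil => simpa using hres
  | cons p ps ih =>
    simp only [List.foldl_cons]
    rcases hsplit : PySem.Str.split? p "-" with _ | parts
    · rw [show stepA (L, R) p = (L, R) by simp [stepA, hsplit],
          show stepB (res, l, r) p = (res, l, r) by simp [stepB, hsplit]]
      exact ih L R res l r hnd hL hR hl hr hres
    · rcases parts with _ | ⟨d, _ | ⟨s, _ | ⟨x, rest⟩⟩⟩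
      · rw [show stepA (L, R) p = (L, R) by simp [stepA, hsplit],
            show stepB (res, l, r) p = (res, l, r) by simp [stepB, hsplit]]
        exact ih L R res l r hnd hL hR hl hr hres
      · rw [show stepA (L, R) p = (L, R) by simp [stepA, hsplit],
            show stepB (res, l, r) p = (res, l, r) by simp [stepB, hsplit]]
        exact ih L R res l r hnd hL hR hl hr hres
      swap
      · rw [show stepA (L, R) p = (L, R) by simp [stepA, hsplit],
            show stepB (res, l, r) p = (res, l, r) by simp [stepB, hsplit]]
        exact ih L R res l r hnd hL hR hl hr hres
      -- the real case: parts = [d, s]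
      by_cases hd : d = "L"
      · -- A bumps the left histogram; in either contains-branch the new value is old + 1
        have eA : stepA (L, R) p = (L.insert s (L.getD s 0 + 1), R) := by
          by_cases hc : L.contains s = true
          · simp [stepA, hsplit, hd, hc]
          · simp [stepA, hsplit, hd, hc,
              PySem.Dict.getD_of_not_contains L (0 : Int) (by simpa using hc)]
        have hminL : (0 : Int) ≤ L.getD s 0 := (hL s).1
        have hminR : (0 : Int) ≤ R.getD s 0 := hR s
        have hrs := hr s
        by_cases hm : r.getD s 0 > 0
        · -- a right item is waiting: B matches, A's overlap grows by exactly 1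
          have eB : stepB (res, l, r) p =
              (res + 1, l, r.insert s (r.getD s 0 - 1)) := by
            simp [stepB, hsplit, hd, hm]
          rw [eA, eB]
          refine ih _ _ _ _ _ (PySem.Dict.nodup_keys_insert L s _ hnd) ?_ hR ?_ ?_ ?_
          · intro t
            by_cases ht : t = s
            · subst ht
              simp; omega
            · simpa [PySem.Dict.getD_insert, PySem.Dict.contains_insert, ht] using hL t
          · intro t
            by_cases ht : t = s
            · subst ht
              have := hl t
              simp; omega
            · simpa [PySem.Dict.getD_insert, ht] using hl t
          · intro t
            by_cases ht : t = s
            · subst ht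
              simp; omega
            · simpa [PySem.Dict.getD_insert, ht] using hr t
          · rw [overlap_insert_left L R s (L.getD s 0 + 1) hnd]
            by_cases hc : L.contains s = true
            · simp only [hc, if_true, ← hres]; omega
            · have h0 : L.getD s 0 = 0 :=
                PySem.Dict.getD_of_not_contains L (0 : Int) (by simpa using hc)
              simp only [hc, Bool.false_eq_true, if_false, ← hres]; omega
        · -- no right item waiting: B stashes a left item, A's overlap is unchanged
          have eB : stepB (res, l, r) p =
              (res, l.insert s (l.getD s 0 + 1), r) := by
            simp [stepB, hsplit, hd, hm]
          rw [eA, eB]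
          refine ih _ _ _ _ _ (PySem.Dict.nodup_keys_insert L s _ hnd) ?_ hR ?_ ?_ ?_
          · intro t
            by_cases ht : t = s
            · subst ht
              simp; omega
            · simpa [PySem.Dict.getD_insert, PySem.Dict.contains_insert, ht] using hL t
          · intro t
            by_cases ht : t = s
            · subst ht
              have := hl t
              simp; omega
            · simpa [PySem.Dict.getD_insert, ht] using hl t
          · intro t
            by_cases ht : t = s
            · subst ht
              simp; omega
            · simpa [PySem.Dict.getD_insert, ht] using hr t
          · rw [overlap_insert_left L R s (L.getD s 0 + 1) hnd]
            by_cases hc : L.contains s = true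
            · simp only [hc, if_true, ← hres]; omega
            · have h0 : L.getD s 0 = 0 :=
                PySem.Dict.getD_of_not_contains L (0 : Int) (by simpa using hc)
              simp only [hc, Bool.false_eq_true, if_false, ← hres]; omega
      · by_cases hd' : d = "R"
        · -- A bumps the right histogram
          have eA : stepA (L, R) p = (L, R.insert s (R.getD s 0 + 1)) := by
            by_cases hc : R.contains s = true
            · simp [stepA, hsplit, hd', hc]
            · simp [stepA, hsplit, hd', hc,
                PySem.Dict.getD_of_not_contains R (0 : Int) (by simpa using hc)]
          have hminL : (0 : Int) ≤ L.getD s 0 := (hL s).1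
          have hminR : (0 : Int) ≤ R.getD s 0 := hR s
          have hls := hl s
          by_cases hm : l.getD s 0 > 0
          · -- a left item is waiting: B matches, A's overlap grows by exactly 1
            have eB : stepB (res, l, r) p =
                (res + 1, l.insert s (l.getD s 0 - 1), r) := by
              simp [stepB, hsplit, hd', hm]
            rw [eA, eB]
            have hcs : L.contains s = true := (hL s).2 (by omega)
            refine ih _ _ _ _ _ hnd hL ?_ ?_ ?_ ?_
            · intro t
              by_cases ht : t = s
              · subst ht; simp; omega
              · simpa [PySem.Dict.getD_insert, ht] using hR t
            · intro t
              by_cases ht : t = s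
              · subst ht
                simp; omega
              · simpa [PySem.Dict.getD_insert, ht] using hl t
            · intro t
              by_cases ht : t = s
              · subst ht
                have := hr t
                simp; omega
              · simpa [PySem.Dict.getD_insert, ht] using hr t
            · rw [overlap_insert_right L R s (R.getD s 0 + 1) hnd]
              simp only [hcs, if_true, ← hres]; omega
          · -- no left item waiting: B stashes a right item, A's overlap is unchanged
            have eB : stepB (res, l, r) p =
                (res, l, r.insert s (r.getD s 0 + 1)) := by
              simp [stepB, hsplit, hd', hm]
            rw [eA, eB]
            refine ih _ _ _ _ _ hnd hL ?_ ?_ ?_ ?_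
            · intro t
              by_cases ht : t = s
              · subst ht; simp; omega
              · simpa [PySem.Dict.getD_insert, ht] using hR t
            · intro t
              by_cases ht : t = s
              · subst ht
                simp; omega
              · simpa [PySem.Dict.getD_insert, ht] using hl t
            · intro t
              by_cases ht : t = s
              · subst ht
                have := hr t
                simp; omega
              · simpa [PySem.Dict.getD_insert, ht] using hr t
            · rw [overlap_insert_right L R s (R.getD s 0 + 1) hnd]
              by_cases hc : L.contains s = true
              · simp only [hc, if_true, ← hres]; omega
              · simp [hc, ← hres]
        · rw [show stepA (L, R) p = (L, R) by simp [stepA, hsplit, hd, hd'],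
              show stepB (res, l, r) p = (res, l, r) by simp [stepB, hsplit, hd, hd']]
          exact ih L R res l r hnd hL hR hl hr hres

-- ===== VERDICT (by name: the statement is the Claim_ definition above) =====
theorem max_pairs_spec : Claim_equal_max_pairs := by
  intro pairs _ _
  unfold Spec_max_pairs max_pairs max_pairs_alt
  exact (main_invariant pairs PySem.Dict.empty PySem.Dict.empty 0 PySem.Dict.empty
    PySem.Dict.empty (by simp) (by simp) (by simp) (by simp) (by simp)
    (by simp [calculate_overlap])).symm
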